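-- pv_equiv track=rewrite | github.com/calvinz168/naomi-battlesnake | server_logic.py | avoid_borders
-- ===== SOURCE A (Python) =====
-- from typing import List, Dict
--
-- def avoid_borders(width, height, my_head: Dict[str, int], possible_moves: List[str]) -> List[str]:
--     if my_head["x"] + 1 == width:       # the head will hit right side of board
--         while "right" in possible_moves:
--             possible_moves.remove("right")
--
--     if my_head["x"] - 1 == -1:           # the head will hit left side of board
--         while "left" in possible_moves:
--             possible_moves.remove("left")
--
--     if my_head["y"] + 1 == height:      # the head will hit top side of board
--         while "up" in possible_moves:
--             possible_moves.remove("up")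
--
--     if my_head["y"] - 1 == -1:           # the head will hit bottom side of board
--         while "down" in possible_moves:
--             possible_moves.remove("down")
--
--     return possible_moves
-- ===== SOURCE B (Python) =====
-- def avoid_borders(width, height, my_head, possible_moves):
--     head_x = my_head["x"]
--     head_y = my_head["y"]
--     forbidden = []
--     if head_x + 1 == width:
--         forbidden.append("right")
--     if head_x - 1 == -1:
--         forbidden.append("left")
--     if head_y + 1 == height:
--         forbidden.append("up")
--     if head_y - 1 == -1:
--         forbidden.append("down")
--     possible_moves[:] = [m for m in possible_moves if m not in forbidden]
--     return possible_moves
-- ===== Notes on version B (the rewrite author's own statement) =====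
-- stated objective: simpler
-- what changed: Replaces A's four repeated scan-and-remove while-loops with building a forbidden-direction list once and removing banned moves in a single filtering pass (still mutating possible_moves in place via slice assignment).
import Mathlib
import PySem

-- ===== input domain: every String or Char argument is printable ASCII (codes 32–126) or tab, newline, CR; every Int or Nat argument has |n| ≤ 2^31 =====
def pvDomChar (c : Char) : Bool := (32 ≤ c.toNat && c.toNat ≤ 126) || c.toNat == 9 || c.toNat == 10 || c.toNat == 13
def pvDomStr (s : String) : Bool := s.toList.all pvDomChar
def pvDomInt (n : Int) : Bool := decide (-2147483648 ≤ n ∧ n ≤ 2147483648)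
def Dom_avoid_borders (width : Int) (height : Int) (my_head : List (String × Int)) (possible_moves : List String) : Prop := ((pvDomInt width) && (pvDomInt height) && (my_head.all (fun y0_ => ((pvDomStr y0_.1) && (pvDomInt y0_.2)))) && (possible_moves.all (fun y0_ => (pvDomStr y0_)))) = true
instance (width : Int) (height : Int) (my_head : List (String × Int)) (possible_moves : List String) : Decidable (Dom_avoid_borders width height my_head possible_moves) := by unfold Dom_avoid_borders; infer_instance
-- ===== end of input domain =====

-- B replaces A's four scan-and-remove while-loops by building a `forbidden` list once and
-- doing a single in-place filtering pass (B mutates possible_moves via slice assignment, as A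
-- mutates it via remove; the equivalence proved here is about the return value). Objective: simpler.

-- ===== PORT A =====
-- length decreases at each `remove` of the while-loop (used by whileRemove's termination proof)
lemma remove?_length_lt {v : String} {l l' : List String}
    (h : PySem.List.remove? l v = some l') : l'.length < l.length := by
  have hv : v ∈ l := by
    by_contra hv
    simp [(PySem.List.remove?_eq_none_iff l v).mpr hv] at h
  rw [PySem.List.remove?_eq_some_erase l v hv] at h
  cases h
  have h1 := List.length_erase_of_mem hv
  have h2 : 0 < l.length := List.length_pos_of_mem hv
  omega

-- `while v in l: l.remove(v)` — removes occurrences of v one at a time until none remain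
def whileRemove (v : String) (l : List String) : List String :=
  match h : PySem.List.remove? l v with
  | some l' => whileRemove v l'
  | none => l
termination_by l.length
decreasing_by exact remove?_length_lt h

def avoid_borders (width : Int) (height : Int) (my_head : List (String × Int)) (possible_moves : List String) : List String :=
  -- my_head["x"] / my_head["y"]: first-match lookup; Pre_ requires both keys present
  let pm1 := if (my_head.lookup "x").getD 0 + 1 = width then whileRemove "right" possible_moves else possible_moves
  let pm2 := if (my_head.lookup "x").getD 0 - 1 = -1 then whileRemove "left" pm1 else pm1
  let pm3 := if (my_head.lookup "y").getD 0 + 1 = height then whileRemove "up" pm2 else pm2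
  let pm4 := if (my_head.lookup "y").getD 0 - 1 = -1 then whileRemove "down" pm3 else pm3
  pm4

-- ===== PORT B =====
def avoid_borders_alt (width : Int) (height : Int) (my_head : List (String × Int)) (possible_moves : List String) : List String :=
  let head_x := (my_head.lookup "x").getD 0
  let head_y := (my_head.lookup "y").getD 0
  let f1 := if head_x + 1 = width then [("right" : String)] else []
  let f2 := f1 ++ (if head_x - 1 = -1 then ["left"] else [])
  let f3 := f2 ++ (if head_y + 1 = height then ["up"] else [])
  let forbidden := f3 ++ (if head_y - 1 = -1 then ["down"] else [])
  possible_moves.filter (fun m => !(forbidden.contains m))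

-- ===== PRECONDITION & SPEC =====
-- Pre_ excludes inputs whose head dict lacks key "x" or "y": Python A raises KeyError there.
def Pre_avoid_borders (width : Int) (height : Int) (my_head : List (String × Int)) (possible_moves : List String) : Prop :=
  (my_head.lookup "x").isSome ∧ (my_head.lookup "y").isSome
instance (width : Int) (height : Int) (my_head : List (String × Int)) (possible_moves : List String) : Decidable (Pre_avoid_borders width height my_head possible_moves) := by unfold Pre_avoid_borders; infer_instance

def pvWitness_avoid_borders : Int × Int × (List (String × Int)) × List String :=
  (5, 5, [("x", 4), ("y", 0)], ["up", "down", "left", "right"])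

def Spec_avoid_borders (width : Int) (height : Int) (my_head : List (String × Int)) (possible_moves : List String) (out : List String) : Prop := out = avoid_borders_alt width height my_head possible_moves
instance (width : Int) (height : Int) (my_head : List (String × Int)) (possible_moves : List String) (out : List String) : Decidable (Spec_avoid_borders width height my_head possible_moves out) := by unfold Spec_avoid_borders; infer_instance

-- ===== CLAIM (what is proved, stated in full; the proofs are below) =====
def Claim_equal_avoid_borders : Prop := ∀ (width : Int) (height : Int) (my_head : List (String × Int)) (possible_moves : List String), Dom_avoid_borders width height my_head possible_moves → Pre_avoid_borders width height my_head possible_moves → Spec_avoid_borders width height my_head possible_moves (avoid_borders width height my_head possible_moves)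

-- ===== LEMMAS AND PROOFS =====

lemma filter_erase_ne (v : String) (l : List String) :
    (l.erase v).filter (fun m => m != v) = l.filter (fun m => m != v) := by
  induction l with
  | nil => rfl
  | cons x xs ih =>
    by_cases hx : x = v
    · subst hx; simp
    · rw [List.erase_cons_tail (by simp [hx])]
      simp only [List.filter_cons]
      rw [ih]

lemma whileRemove_eq_filter (v : String) (l : List String) :
    whileRemove v l = l.filter (fun m => m != v) := by
  induction l using whileRemove.induct v with
  | case1 l l' h ih =>
    have hv : v ∈ l := by
      by_contra hv
      simp [(PySem.List.remove?_eq_none_iff l v).mpr hv] at h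
    rw [whileRemove, h]
    show whileRemove v l' = _
    rw [ih]
    have h' := h
    rw [PySem.List.remove?_eq_some_erase l v hv] at h'
    cases h'
    exact filter_erase_ne v l
  | case2 l h =>
    have hv : v ∉ l := (PySem.List.remove?_eq_none_iff l v).mp h
    rw [whileRemove, h]
    show l = _
    exact (List.filter_eq_self.mpr (fun x hx => by simp [bne]; rintro rfl; exact hv hx)).symm

-- ===== VERDICT (by name: the statement is the Claim_ definition above) =====
theorem avoid_borders_spec : Claim_equal_avoid_borders := by
  intro width height my_head possible_moves _ _
  unfold Spec_avoid_borders avoid_borders avoid_borders_alt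
  simp only [whileRemove_eq_filter]
  split_ifs <;>
    simp only [List.filter_filter, List.append_nil, List.nil_append, List.append_assoc] <;>
      first
        | exact List.filter_congr (fun x _ => by
            by_cases h1 : x = "right"
            · subst h1; decide
            · by_cases h2 : x = "left"
              · subst h2; decide
              · by_cases h3 : x = "up"
                · subst h3; decide
                · by_cases h4 : x = "down"
                  · subst h4; decide
                  · simp_all)
        | simp
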